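-- pv_equiv track=rewrite | github.com/vitor-araujo25/TopEspProg | lista4/10464.py | _sum_same_signal_aligned
-- ===== SOURCE A (Python) =====
-- def _sum_same_signal_aligned(a,b):
--
--     a_int, a_dec = a
--     b_int, b_dec = b
--
--     carry = 0
--     sum_dec = ""
--
--     for i in range(len(a_dec)-1,-1,-1):
--         piece_sum = (int(a_dec[i]) + int(b_dec[i]) + carry)
--         carry = piece_sum // 10
--         value = piece_sum % 10
--         sum_dec = str(value) + sum_dec
--
--     sum_int = ""
--
--     for i in range(-1, -(len(a_int)+1), -1):
--         piece_sum = (int(a_int[i]) + int(b_int[i]) + carry)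
--         carry = piece_sum // 10
--         value = piece_sum % 10
--         sum_int = str(value) + sum_int
--
--     return carry, sum_int, sum_dec
-- ===== SOURCE B (Python) =====
-- def _sum_same_signal_aligned(a, b):
--     a_int, a_dec = a
--     b_int, b_dec = b
--
--     def val(s):
--         v = 0
--         for ch in s:
--             v = 10 * v + int(ch)
--         return v
--
--     carry = 0
--     sum_dec = ""
--     L = len(a_dec)
--     if L > 0:
--         carry, r = divmod(val(a_dec) + val(b_dec[:L]), 10 ** L)
--         sum_dec = str(r).zfill(L)
--
--     sum_int = ""
--     M = len(a_int)
--     if M > 0: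
--         carry, r = divmod(val(a_int) + val(b_int[-M:]) + carry, 10 ** M)
--         sum_int = str(r).zfill(M)
--
--     return carry, sum_int, sum_dec
-- ===== Notes on version B (the rewrite author's own statement) =====
-- stated objective: alternative
-- what changed: Replaces A's per-digit carry-propagation loops that build the result strings by repeated front-concatenation with a whole-part computation: each part's numeric value (over exactly the digits A reads) is summed once, split with a single divmod by 10**len, and formatted with str().zfill().
import Mathlib
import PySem

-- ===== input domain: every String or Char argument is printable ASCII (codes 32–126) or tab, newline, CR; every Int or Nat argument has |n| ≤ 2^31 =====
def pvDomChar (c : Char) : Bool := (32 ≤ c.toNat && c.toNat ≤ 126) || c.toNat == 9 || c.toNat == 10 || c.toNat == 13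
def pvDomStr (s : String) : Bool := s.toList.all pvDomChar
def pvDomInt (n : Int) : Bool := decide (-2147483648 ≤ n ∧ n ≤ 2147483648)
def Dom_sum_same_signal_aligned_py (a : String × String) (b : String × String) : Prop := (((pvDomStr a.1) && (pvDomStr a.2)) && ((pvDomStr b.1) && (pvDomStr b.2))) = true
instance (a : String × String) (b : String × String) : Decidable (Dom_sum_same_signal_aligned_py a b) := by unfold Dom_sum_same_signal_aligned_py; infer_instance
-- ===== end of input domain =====

-- B replaces A's per-digit carry loops with: value each part once, a single divmod by 10**len, and str().zfill() formatting (alternative decomposition, same asymptotics).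

-- int(c) for a one-character string c; the 0 default is only reached where Python raises ValueError (excluded by Pre_)
def pvCharInt (c : Char) : Int := (PySem.Int.ofChars? [c]).getD 0
-- s[i] with Python indexing; the ' ' default is only reached where Python raises IndexError (excluded by Pre_)
def pvAt (l : List Char) (i : Int) : Char := PySem.List.pyGetD l i ' '

-- ===== PORT A =====
def sum_same_signal_aligned_py (a : String × String) (b : String × String) : Int × String × String :=
  let aInt := a.1.toList
  let aDec := a.2.toList
  let bInt := b.1.toList
  let bDec := b.2.toList
  -- carry = 0; sum_dec = ""; for i in range(len(a_dec)-1, -1, -1): …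
  let st1 := (PySem.List.pyRange ((aDec.length : Int) - 1) (-1) (-1)).foldl
      (fun (st : Int × List Char) i =>
        let piece := pvCharInt (pvAt aDec i) + pvCharInt (pvAt bDec i) + st.1
        (PySem.Int.floordiv piece 10, PySem.Int.toChars (PySem.Int.mod piece 10) ++ st.2))
      (0, [])
  -- sum_int = ""; for i in range(-1, -(len(a_int)+1), -1): …
  let st2 := (PySem.List.pyRange (-1) (-((aInt.length : Int) + 1)) (-1)).foldl
      (fun (st : Int × List Char) i =>
        let piece := pvCharInt (pvAt aInt i) + pvCharInt (pvAt bInt i) + st.1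
        (PySem.Int.floordiv piece 10, PySem.Int.toChars (PySem.Int.mod piece 10) ++ st.2))
      (st1.1, [])
  (st2.1, String.ofList st2.2, String.ofList st1.2)

-- ===== PORT B =====
-- val(s): v = 0; for ch in s: v = 10*v + int(ch)
def pvVal (l : List Char) : Int := l.foldl (fun v ch => 10 * v + pvCharInt ch) 0

def sum_same_signal_aligned_py_alt (a : String × String) (b : String × String) : Int × String × String :=
  let aInt := a.1.toList
  let aDec := a.2.toList
  let bInt := b.1.toList
  let bDec := b.2.toList
  let L := aDec.length
  -- if L > 0: carry, r = divmod(val(a_dec) + val(b_dec), 10 ** L); sum_dec = str(r).zfill(L)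
  let dec : Int × List Char :=
    if 0 < L then
      let qr := (PySem.Int.divmod? (pvVal aDec + pvVal (PySem.List.slice bDec none (some (L : Int)))) ((10 : Int) ^ L)).getD (0, 0)
      (qr.1, PySem.Chars.zfill (PySem.Int.toChars qr.2) (L : Int))
    else (0, [])
  let M := aInt.length
  -- if M > 0: carry, r = divmod(val(a_int) + val(b_int) + carry, 10 ** M); sum_int = str(r).zfill(M)
  let int_ : Int × List Char :=
    if 0 < M then
      let qr := (PySem.Int.divmod? (pvVal aInt + pvVal (PySem.List.slice bInt (some (-(M : Int))) none) + dec.1) ((10 : Int) ^ M)).getD (0, 0)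
      (qr.1, PySem.Chars.zfill (PySem.Int.toChars qr.2) (M : Int))
    else (dec.1, [])
  (int_.1, String.ofList int_.2, String.ofList dec.2)

-- ===== PRECONDITION & SPEC =====
-- Pre_ is exactly the set of inputs on which A returns: each part of b at least as long as a's part (otherwise
-- IndexError), and every character A actually reads (all of a's parts; the first len(a_dec) chars of b_dec; the last
-- len(a_int) chars of b_int) an ASCII digit (otherwise int() raises ValueError).
def Pre_sum_same_signal_aligned_py (a : String × String) (b : String × String) : Prop :=
  a.1.toList.length ≤ b.1.toList.length ∧ a.2.toList.length ≤ b.2.toList.length ∧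
  ((a.1.toList ++ a.2.toList ++ b.1.toList.drop (b.1.toList.length - a.1.toList.length)
      ++ b.2.toList.take a.2.toList.length).all Char.isDigit) = true
instance (a : String × String) (b : String × String) : Decidable (Pre_sum_same_signal_aligned_py a b) := by unfold Pre_sum_same_signal_aligned_py; infer_instance
def pvWitness_sum_same_signal_aligned_py : (String × String) × (String × String) := (("94", "7"), ("15", "8"))

def Spec_sum_same_signal_aligned_py (a : String × String) (b : String × String) (out : Int × String × String) : Prop := out = sum_same_signal_aligned_py_alt a b
instance (a : String × String) (b : String × String) (out : Int × String × String) : Decidable (Spec_sum_same_signal_aligned_py a b out) := by unfold Spec_sum_same_signal_aligned_py; infer_instance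

-- ===== CLAIM (what is proved, stated in full; the proofs are below) =====
def Claim_equal_sum_same_signal_aligned_py : Prop := ∀ (a : String × String) (b : String × String), Dom_sum_same_signal_aligned_py a b → Pre_sum_same_signal_aligned_py a b → Spec_sum_same_signal_aligned_py a b (sum_same_signal_aligned_py a b)

-- ===== LEMMAS AND PROOFS =====

-- digit value of a digit character
def pvDval (c : Char) : Nat := c.toNat - 48
-- value of a zipped pair list, least-significant pair first
def pvSS : List (Char × Char) → Nat
  | [] => 0
  | (x, y) :: ps => pvDval x + pvDval y + 10 * pvSS ps
-- decimal representation of m zero-padded to exactly k digits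
def pvPad : Nat → Nat → List Char
  | 0, _ => []
  | k + 1, m => pvPad k (m / 10) ++ [Nat.digitChar (m % 10)]
-- value of a digit list, least-significant first
def pvRval : List Char → Nat
  | [] => 0
  | c :: cs => pvDval c + 10 * pvRval cs
-- value of a digit list, most-significant first
def pvValN (l : List Char) : Nat := l.foldl (fun v c => 10 * v + pvDval c) 0
-- the loop body shared by A's two loops, applied to the pair of digit chars at the index
def pvStep (st : Int × List Char) (p : Char × Char) : Int × List Char :=
  let piece := pvCharInt p.1 + pvCharInt p.2 + st.1
  (PySem.Int.floordiv piece 10, PySem.Int.toChars (PySem.Int.mod piece 10) ++ st.2)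

theorem pvCharInt_digit (c : Char) (h : c.isDigit = true) : pvCharInt c = (pvDval c : Int) := by
  simp [Char.isDigit] at h
  obtain ⟨h1, h2⟩ := h
  rw [UInt32.le_iff_toNat_le] at h1 h2
  have e1 : UInt32.toNat 48 = 48 := by decide
  have e2 : UInt32.toNat 57 = 57 := by decide
  rw [← Char.ofNat_toNat c]
  rw [e1] at h1
  rw [e2] at h2
  have h1' : 48 ≤ c.toNat := h1
  have h2' : c.toNat ≤ 57 := h2
  generalize c.toNat = n at h1' h2'
  interval_cases n <;> decide

theorem pvToChars_lt10 (m : Nat) (h : m < 10) : PySem.Int.toChars (m : Int) = [Nat.digitChar m] := by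
  simp [PySem.Int.toChars, Nat.toDigits_of_lt_base h]

theorem pvDivmod_nat (T D : Nat) (hD : 0 < D) :
    (PySem.Int.divmod? (T : Int) (D : Int)).getD (0, 0) = (((T / D : Nat) : Int), ((T % D : Nat) : Int)) := by
  simp [PySem.Int.divmod?, hD.ne', Int.fdiv_eq_ediv, Int.fmod_eq_emod]

theorem pvFoldl_step (ps : List (Char × Char)) (hd : ∀ p ∈ ps, p.1.isDigit = true ∧ p.2.isDigit = true)
    (c : Nat) (acc : List Char) :
    ps.foldl pvStep ((c : Int), acc)
      = ((((pvSS ps + c) / 10 ^ ps.length : Nat) : Int),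
         pvPad ps.length ((pvSS ps + c) % 10 ^ ps.length) ++ acc) := by
  induction ps generalizing c acc with
  | nil => simp [pvSS, pvPad]
  | cons p t ih =>
    obtain ⟨x, y⟩ := p
    have hx := (hd _ (List.mem_cons_self ..)).1
    have hy := (hd _ (List.mem_cons_self ..)).2
    have hstep : pvStep ((c : Int), acc) (x, y)
        = ((((pvDval x + pvDval y + c) / 10 : Nat) : Int),
           Nat.digitChar ((pvDval x + pvDval y + c) % 10) :: acc) := by
      simp only [pvStep, pvCharInt_digit _ hx, pvCharInt_digit _ hy]
      have hc : ((pvDval x : Int) + (pvDval y : Int) + (c : Int)) = ((pvDval x + pvDval y + c : Nat) : Int) := by push_cast; ring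
      rw [hc]
      have h10 : (10 : Int) = ((10 : Nat) : Int) := by norm_num
      rw [h10, PySem.Int.floordiv_natCast, PySem.Int.mod_natCast,
        pvToChars_lt10 _ (Nat.mod_lt _ (by norm_num))]
      simp
    rw [List.foldl_cons, hstep, ih (fun p hp => hd p (List.mem_cons_of_mem _ hp))]
    have harith : pvSS t + (pvDval x + pvDval y + c) / 10 = (pvSS ((x, y) :: t) + c) / 10 := by
      simp only [pvSS]; omega
    rw [harith]
    simp only [Prod.mk.injEq, List.length_cons]
    set T := pvSS ((x, y) :: t) + c with hT
    have hTx : T = pvDval x + pvDval y + c + 10 * pvSS t := by simp [hT, pvSS]; ring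
    have hpow : (10 : Nat) ^ (t.length + 1) = 10 * 10 ^ t.length := by ring
    constructor
    · congr 1
      rw [Nat.div_div_eq_div_mul, hpow, Nat.mul_comm]
    · show pvPad t.length _ ++ _ = pvPad (t.length + 1) _ ++ acc
      simp only [pvPad, List.append_assoc, List.cons_append, List.nil_append]
      congr 2
      · rw [hpow, Nat.mod_mul_right_div_self]
      · congr 1
        rw [Nat.mod_mod_of_dvd T (by rw [hpow]; exact Dvd.intro _ rfl)]
        omega

theorem pvVal_aux (l : List Char) (h : ∀ c ∈ l, c.isDigit = true) (v : Nat) :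
    l.foldl (fun v ch => 10 * v + pvCharInt ch) ((v : Nat) : Int)
      = ((l.foldl (fun v c => 10 * v + pvDval c) v : Nat) : Int) := by
  induction l generalizing v with
  | nil => simp
  | cons c t ih =>
    simp only [List.foldl_cons]
    rw [pvCharInt_digit c (h c (List.mem_cons_self ..))]
    have : (10 : Int) * (v : Int) + (pvDval c : Int) = ((10 * v + pvDval c : Nat) : Int) := by push_cast; ring
    rw [this, ih (fun c hc => h c (List.mem_cons_of_mem _ hc))]

theorem pvVal_eq (l : List Char) (h : ∀ c ∈ l, c.isDigit = true) : pvVal l = (pvValN l : Int) := by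
  have := pvVal_aux l h 0
  simpa [pvVal, pvValN] using this

theorem pvRval_append (l : List Char) (c : Char) :
    pvRval (l ++ [c]) = pvRval l + pvDval c * 10 ^ l.length := by
  induction l with
  | nil => simp [pvRval]
  | cons x t ih => simp [pvRval, ih]; ring

theorem pvValN_acc (l : List Char) (v : Nat) :
    l.foldl (fun v c => 10 * v + pvDval c) v = v * 10 ^ l.length + pvValN l := by
  induction l generalizing v with
  | nil => simp [pvValN]
  | cons c t ih =>
    simp only [List.foldl_cons, pvValN]
    rw [ih, ih (10 * 0 + pvDval c)]
    simp [List.length_cons]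
    ring

theorem pvValN_rval (l : List Char) : pvValN l = pvRval l.reverse := by
  induction l with
  | nil => rfl
  | cons c t ih =>
    show (c :: t).foldl (fun v c => 10 * v + pvDval c) 0 = _
    simp only [List.foldl_cons, List.reverse_cons]
    rw [pvValN_acc, pvRval_append, ← ih]
    simp [pvValN]
    ring

theorem pvSS_split (rx ry : List Char) (h : rx.length = ry.length) :
    pvSS (rx.zip ry) = pvRval rx + pvRval ry := by
  induction rx generalizing ry with
  | nil =>
    have : ry = [] := List.length_eq_zero_iff.mp h.symm
    simp [this, pvSS, pvRval]
  | cons x t ih =>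
    cases ry with
    | nil => simp at h
    | cons y s =>
      simp only [List.zip_cons_cons, pvSS, pvRval]
      rw [ih s (by simpa using h)]
      ring

theorem pvRange_down (n : Nat) :
    PySem.List.pyRange ((n : Int) - 1) (-1) (-1) = (List.range n).map (fun (k : Nat) => ((n : Int) - 1 - k)) := by
  simp only [PySem.List.pyRange]
  rw [if_neg (by norm_num : ¬ (-1 : Int) = 0)]
  rw [if_neg (by norm_num : ¬ (0 : Int) < -1)]
  have hc : (if (-1 : Int) < (n : Int) - 1 then (((n : Int) - 1 - (-1) + -(-1 : Int) - 1) / -(-1 : Int)).toNat else 0) = n := by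
    norm_num
    omega
  rw [hc]
  apply List.map_congr_left
  intro k _
  ring

theorem pvRange_neg (n : Nat) :
    PySem.List.pyRange (-1) (-((n : Int) + 1)) (-1) = (List.range n).map (fun (k : Nat) => (-1 - k : Int)) := by
  simp only [PySem.List.pyRange]
  rw [if_neg (by norm_num : ¬ (-1 : Int) = 0)]
  rw [if_neg (by norm_num : ¬ (0 : Int) < -1)]
  have hc : (if -((n : Int) + 1) < -1 then ((-1 - (-((n : Int) + 1)) + -(-1 : Int) - 1) / -(-1 : Int)).toNat else 0) = n := by
    norm_num
    omega
  rw [hc]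
  apply List.map_congr_left
  intro k _
  ring

theorem pvAt_pos (xs : List Char) (n k : Nat) (hn : n ≤ xs.length) (hk : k < n) :
    pvAt xs ((n : Int) - 1 - k)
      = (xs.take n).reverse[k]'(by rw [List.length_reverse, List.length_take]; omega) := by
  have h0 : (0 : Int) ≤ (n : Int) - 1 - k := by omega
  have h1 : (n : Int) - 1 - k < (xs.length : Int) := by omega
  rw [pvAt, PySem.List.pyGetD_eq_getElem xs ' ' h0 h1]
  rw [List.getElem_reverse, List.getElem_take]
  congr 1
  rw [List.length_take]
  omega

theorem pvAt_neg (xs : List Char) (n k : Nat) (hn : n ≤ xs.length) (hk : k < n) :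
    pvAt xs (-1 - k) = xs.reverse[k]'(by simp; omega) := by
  rw [pvAt, PySem.List.pyGetD, PySem.List.pyGet?, PySem.List.pyIdx?]
  have h0 : ¬ (0 : Int) ≤ -1 - (k : Int) := by omega
  have h1 : -(xs.length : Int) ≤ -1 - (k : Int) := by omega
  simp only [h0, if_false, h1, if_true]
  have h2 : (-(-1 - (k : Int))).toNat = k + 1 := by omega
  rw [h2]
  rw [List.getElem_reverse]
  have h3 : xs.length - (k + 1) < xs.length := by omega
  simp [List.getElem?_eq_getElem h3]
  congr 1
  omega

theorem pvLoop1 (xs ys : List Char) (h : xs.length ≤ ys.length) (st : Int × List Char) :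
    (PySem.List.pyRange ((xs.length : Int) - 1) (-1) (-1)).foldl
        (fun st i => pvStep st (pvAt xs i, pvAt ys i)) st
      = (xs.reverse.zip (ys.take xs.length).reverse).foldl pvStep st := by
  rw [pvRange_down, List.foldl_map]
  have hmap : (List.range xs.length).map
      (fun (k : Nat) => (pvAt xs ((xs.length : Int) - 1 - k), pvAt ys ((xs.length : Int) - 1 - k)))
      = xs.reverse.zip (ys.take xs.length).reverse := by
    apply List.ext_getElem
    · simp [Nat.min_eq_left h]
    · intro i h1 h2
      simp only [List.getElem_map, List.getElem_range, List.getElem_zip]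
      have hi : i < xs.length := by simpa using h1
      rw [pvAt_pos xs xs.length i (Nat.le_refl _) hi, pvAt_pos ys xs.length i h hi]
      simp [List.take_length]
  rw [← hmap, List.foldl_map]

theorem pvLoop2 (xs ys : List Char) (h : xs.length ≤ ys.length) (st : Int × List Char) :
    (PySem.List.pyRange (-1) (-((xs.length : Int) + 1)) (-1)).foldl
        (fun st i => pvStep st (pvAt xs i, pvAt ys i)) st
      = (xs.reverse.zip (ys.reverse.take xs.length)).foldl pvStep st := by
  rw [pvRange_neg, List.foldl_map]
  have hmap : (List.range xs.length).map
      (fun (k : Nat) => (pvAt xs (-1 - (k:Int)), pvAt ys (-1 - (k:Int))))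
      = xs.reverse.zip (ys.reverse.take xs.length) := by
    apply List.ext_getElem
    · simp [Nat.min_eq_left h]
    · intro i h1 h2
      simp only [List.getElem_map, List.getElem_range, List.getElem_zip, List.getElem_take]
      have hi : i < xs.length := by simpa using h1
      rw [pvAt_neg xs xs.length i (Nat.le_refl _) hi, pvAt_neg ys xs.length i h hi]
  rw [← hmap, List.foldl_map]

theorem pvPad_zero (k : Nat) : pvPad k 0 = List.replicate k '0' := by
  induction k with
  | zero => rfl
  | succ k ih => rw [pvPad]; simp [ih, List.replicate_succ']; decide

theorem pvDigitChar_isDigit (d : Nat) (h : d < 10) : (Nat.digitChar d).isDigit = true := by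
  interval_cases d <;> decide

theorem pvToDigits_digits (m : Nat) : ∀ c ∈ Nat.toDigits 10 m, c.isDigit = true := by
  induction m using Nat.strong_induction_on with
  | _ m ih =>
    rw [Nat.toDigits_eq_if (by norm_num)]
    split
    · intro c hc
      simp at hc
      subst hc
      exact pvDigitChar_isDigit m (by omega)
    · intro c hc
      rcases List.mem_append.mp hc with h1 | h2
      · exact ih (m / 10) (by omega) c h1
      · simp at h2
        subst h2
        exact pvDigitChar_isDigit _ (Nat.mod_lt _ (by norm_num))

theorem pvZfill_append (c : Char) (rest : List Char) (d : Char) (k : Nat)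
    (hc : ¬(c = '+' ∨ c = '-')) :
    PySem.Chars.zfill ((c :: rest) ++ [d]) ((k : Int) + 1) = PySem.Chars.zfill (c :: rest) (k : Int) ++ [d] := by
  simp only [PySem.Chars.zfill, List.cons_append, List.length_cons, List.length_append,
    List.length_nil]
  by_cases hk : k ≤ rest.length + 1
  · rw [if_pos (by push_cast; omega), if_pos (by push_cast; omega)]
    simp
  · simp only [if_neg hc]
    rw [if_neg (by push_cast; omega), if_neg (by push_cast; omega)]
    have e1 : ((k : Int) + 1).toNat - (rest.length + 1 + 1) = (k : Int).toNat - (rest.length + 1) := by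
      omega
    rw [e1]
    simp [List.append_assoc]

theorem pvToChars_nat (m : Nat) : PySem.Int.toChars (m : Int) = Nat.toDigits 10 m := by
  simp [PySem.Int.toChars]

theorem pvZfill_pad (k m : Nat) (hk : 0 < k) (h : m < 10 ^ k) :
    PySem.Chars.zfill (PySem.Int.toChars (m : Int)) (k : Int) = pvPad k m := by
  rw [pvToChars_nat]
  induction k generalizing m with
  | zero => omega
  | succ k ih =>
    by_cases hk0 : k = 0
    · subst hk0
      have hm : m < 10 := by simpa using h
      rw [Nat.toDigits_of_lt_base hm]
      rw [pvPad, pvPad]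
      simp [PySem.Chars.zfill, Nat.mod_eq_of_lt hm]
    · have hk' : 0 < k := by omega
      by_cases hm : m < 10
      · -- single digit, pad with k zeros
        rw [Nat.toDigits_of_lt_base hm]
        simp only [PySem.Chars.zfill]
        rw [if_neg (by simp; omega)]
        rw [if_neg (by
          intro hsign
          have := pvDigitChar_isDigit m (by omega)
          rcases hsign with h1 | h1 <;> rw [h1] at this <;> simp at this)]
        have hdiv : m / 10 = 0 := by omega
        rw [pvPad, hdiv, pvPad_zero, Nat.mod_eq_of_lt hm]
        have : ((k : Int) + 1).toNat - [Nat.digitChar m].length = k := by simp only [List.length_singleton]; omega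
        push_cast
        rw [this]
      · -- m ≥ 10
        have hsplit : Nat.toDigits 10 m = Nat.toDigits 10 (m / 10) ++ [Nat.digitChar (m % 10)] :=
          Nat.toDigits_of_base_le (by norm_num) (by omega)
        rw [hsplit]
        obtain ⟨c, rest, hcr⟩ : ∃ c rest, Nat.toDigits 10 (m / 10) = c :: rest := by
          cases hd : Nat.toDigits 10 (m / 10) with
          | nil =>
            exact absurd hd (by rw [Nat.toDigits_eq_if (by norm_num)]; split <;> simp)
          | cons c rest => exact ⟨c, rest, rfl⟩
        have hcdig : c.isDigit = true := pvToDigits_digits (m / 10) c (by rw [hcr]; exact List.mem_cons_self ..)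
        have hsign : ¬(c = '+' ∨ c = '-') := by
          rintro (rfl | rfl) <;> simp at hcdig
        rw [hcr]
        push_cast
        rw [pvZfill_append c rest (Nat.digitChar (m % 10)) k hsign]
        rw [← hcr]
        rw [ih (m / 10) hk' (by rw [Nat.div_lt_iff_lt_mul (by norm_num : 0 < 10), ← pow_succ]; exact h)]
        rw [pvPad]


theorem pvLoop1' (xs ys : List Char) (h : xs.length ≤ ys.length) (st : Int × List Char) :
    (PySem.List.pyRange ((xs.length : Int) - 1) (-1) (-1)).foldl
        (fun (st : Int × List Char) i =>
          let piece := pvCharInt (pvAt xs i) + pvCharInt (pvAt ys i) + st.1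
          (PySem.Int.floordiv piece 10, PySem.Int.toChars (PySem.Int.mod piece 10) ++ st.2)) st
      = (xs.reverse.zip (ys.take xs.length).reverse).foldl pvStep st :=
  pvLoop1 xs ys h st

theorem pvLoop2' (xs ys : List Char) (h : xs.length ≤ ys.length) (st : Int × List Char) :
    (PySem.List.pyRange (-1) (-((xs.length : Int) + 1)) (-1)).foldl
        (fun (st : Int × List Char) i =>
          let piece := pvCharInt (pvAt xs i) + pvCharInt (pvAt ys i) + st.1
          (PySem.Int.floordiv piece 10, PySem.Int.toChars (PySem.Int.mod piece 10) ++ st.2)) st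
      = (xs.reverse.zip (ys.reverse.take xs.length)).foldl pvStep st :=
  pvLoop2 xs ys h st

theorem pvPart (xs ys : List Char) (h : xs.length = ys.length)
    (hx : ∀ c ∈ xs, c.isDigit = true) (hy : ∀ c ∈ ys, c.isDigit = true) (c : Nat) :
    (xs.reverse.zip ys.reverse).foldl pvStep (((c : Nat) : Int), ([] : List Char))
      = ((((pvValN xs + pvValN ys + c) / 10 ^ xs.length : Nat) : Int),
         pvPad xs.length ((pvValN xs + pvValN ys + c) % 10 ^ xs.length)) := by
  have hlen : (xs.reverse.zip ys.reverse).length = xs.length := by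
    simp [List.length_zip, h]
  have hd : ∀ p ∈ xs.reverse.zip ys.reverse, p.1.isDigit = true ∧ p.2.isDigit = true := by
    intro p hp
    obtain ⟨hp1, hp2⟩ := List.of_mem_zip hp
    exact ⟨hx _ (List.mem_reverse.mp hp1), hy _ (List.mem_reverse.mp hp2)⟩
  rw [pvFoldl_step _ hd c []]
  have hSS : pvSS (xs.reverse.zip ys.reverse) = pvValN xs + pvValN ys := by
    rw [pvSS_split _ _ (by simp [h]), ← pvValN_rval, ← pvValN_rval]
  rw [hSS, hlen]
  simp

theorem pvValSum (xs ys : List Char) (hx : ∀ c ∈ xs, c.isDigit = true)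
    (hy : ∀ c ∈ ys, c.isDigit = true) (c : Nat) :
    pvVal xs + pvVal ys + ((c : Nat) : Int) = ((pvValN xs + pvValN ys + c : Nat) : Int) := by
  rw [pvVal_eq _ hx, pvVal_eq _ hy]
  push_cast
  ring

-- ===== VERDICT (by name: the statement is the Claim_ definition above) =====
theorem sum_same_signal_aligned_py_spec : Claim_equal_sum_same_signal_aligned_py := by
  intro a b _ hpre
  obtain ⟨h1, h2, hdig⟩ := hpre
  simp only [List.all_append, Bool.and_eq_true, List.all_eq_true] at hdig
  obtain ⟨⟨⟨dA1, dA2⟩, dB1⟩, dB2⟩ := hdig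
  unfold Spec_sum_same_signal_aligned_py
  simp only [sum_same_signal_aligned_py, sum_same_signal_aligned_py_alt]
  rw [pvLoop1' _ _ h2, pvLoop2' _ _ h1]
  have hc0 : ((0 : Nat) : Int) = (0 : Int) := rfl
  have hlen2 : a.2.toList.length = (b.2.toList.take a.2.toList.length).length := by
    rw [List.length_take]
    omega
  have hlen1 : a.1.toList.length = (b.1.toList.drop (b.1.toList.length - a.1.toList.length)).length := by
    simp only [List.length_drop]
    omega
  have hrev : b.1.toList.reverse.take a.1.toList.length
      = (b.1.toList.drop (b.1.toList.length - a.1.toList.length)).reverse := by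
    rw [List.reverse_drop]
    congr 1
    omega
  rw [hrev, PySem.List.slice_to_natCast]
  by_cases hL : 0 < a.2.toList.length
  · have hP1 := pvPart a.2.toList (b.2.toList.take a.2.toList.length) hlen2 dA2 dB2 0
    rw [hc0, Nat.add_zero] at hP1
    rw [hP1, if_pos hL]
    have hvD : pvVal a.2.toList + pvVal (b.2.toList.take a.2.toList.length)
        = ((pvValN a.2.toList + pvValN (b.2.toList.take a.2.toList.length) : Nat) : Int) := by
      rw [pvVal_eq _ dA2, pvVal_eq _ dB2]; push_cast; ring
    have hpL : ((10 : Int) ^ a.2.toList.length) = (((10 ^ a.2.toList.length : Nat)) : Int) := by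
      push_cast; ring
    have hposL : 0 < 10 ^ a.2.toList.length := Nat.pow_pos (by norm_num)
    rw [hvD, hpL, pvDivmod_nat _ _ hposL]
    dsimp only
    rw [pvZfill_pad _ _ hL (Nat.mod_lt _ hposL)]
    by_cases hM : 0 < a.1.toList.length
    · have hP2 := pvPart a.1.toList (b.1.toList.drop (b.1.toList.length - a.1.toList.length)) hlen1 dA1 dB1
        ((pvValN a.2.toList + pvValN (b.2.toList.take a.2.toList.length)) / 10 ^ a.2.toList.length)
      rw [hP2, if_pos hM, PySem.List.slice_from_neg_natCast _ _ hM]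
      rw [pvValSum a.1.toList (b.1.toList.drop (b.1.toList.length - a.1.toList.length)) dA1 dB1
        ((pvValN a.2.toList + pvValN (b.2.toList.take a.2.toList.length)) / 10 ^ a.2.toList.length)]
      have hpM : ((10 : Int) ^ a.1.toList.length) = (((10 ^ a.1.toList.length : Nat)) : Int) := by
        push_cast; ring
      have hposM : 0 < 10 ^ a.1.toList.length := Nat.pow_pos (by norm_num)
      rw [hpM, pvDivmod_nat _ _ hposM]
      dsimp only
      rw [pvZfill_pad _ _ hM (Nat.mod_lt _ hposM)]
    · have haI : a.1.toList = [] := List.length_eq_zero_iff.mp (by omega)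
      rw [if_neg hM, haI]
      simp
  · have haD : a.2.toList = [] := List.length_eq_zero_iff.mp (by omega)
    rw [if_neg hL, haD]
    dsimp only [List.reverse_nil, List.take_zero, List.zip_nil_left, List.foldl_nil, List.length_nil]
    by_cases hM : 0 < a.1.toList.length
    · have hP2 := pvPart a.1.toList (b.1.toList.drop (b.1.toList.length - a.1.toList.length)) hlen1 dA1 dB1 0
      rw [hc0, Nat.add_zero] at hP2
      rw [hP2, if_pos hM, PySem.List.slice_from_neg_natCast _ _ hM]
      have hvI : pvVal a.1.toList + pvVal (b.1.toList.drop (b.1.toList.length - a.1.toList.length)) + 0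
          = ((pvValN a.1.toList + pvValN (b.1.toList.drop (b.1.toList.length - a.1.toList.length)) : Nat) : Int) := by
        rw [pvVal_eq _ dA1, pvVal_eq _ dB1]; push_cast; ring
      have hpM : ((10 : Int) ^ a.1.toList.length) = (((10 ^ a.1.toList.length : Nat)) : Int) := by
        push_cast; ring
      have hposM : 0 < 10 ^ a.1.toList.length := Nat.pow_pos (by norm_num)
      rw [hvI, hpM, pvDivmod_nat _ _ hposM]
      dsimp only
      rw [pvZfill_pad _ _ hM (Nat.mod_lt _ hposM)]
    · have haI : a.1.toList = [] := List.length_eq_zero_iff.mp (by omega)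
      rw [if_neg hM, haI]
      simp
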